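-- pv_equiv track=rewrite | github.com/primrose101/CS322 | finite_state_machines/data_types.py | intUnary_lexer
-- ===== SOURCE A (Python) =====
-- def intUnary_lexer(string_input, index):
--     i = index
--     state_table = [[1, 1, 1, 2],
--                    [2, 2, 1, 2],
--                    [2, 2, 2, 2], ]
--
--     state = 0
--     infut = 0
--     string_length = len(string_input)
--     while i != string_length:
--         if string_input[i] == '-':
--             infut = 0
--         elif string_input[i] == '+':
--             infut = 1
--         elif string_input[i].isdigit():
--             infut = 2
--         else:
--             infut = 3
--         state = state_table[state][infut]
--         if state == 2:
--             break
--         i += 1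
--     return i - index
-- ===== SOURCE B (Python) =====
-- def intUnary_lexer(string_input, index):
--     i = index
--     n = len(string_input)
--     if i != n and (string_input[i] in '+-' or string_input[i].isdigit()):
--         i += 1
--         while i != n and string_input[i].isdigit():
--             i += 1
--     return i - index
-- ===== Notes on version B (the rewrite author's own statement) =====
-- stated objective: simpler
-- what changed: Replaces the table-driven FSM (state_table, state, infut) with a two-phase scan: one optional leading sign/digit, then a plain digit run; no state machine remains.
import Mathlib
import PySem

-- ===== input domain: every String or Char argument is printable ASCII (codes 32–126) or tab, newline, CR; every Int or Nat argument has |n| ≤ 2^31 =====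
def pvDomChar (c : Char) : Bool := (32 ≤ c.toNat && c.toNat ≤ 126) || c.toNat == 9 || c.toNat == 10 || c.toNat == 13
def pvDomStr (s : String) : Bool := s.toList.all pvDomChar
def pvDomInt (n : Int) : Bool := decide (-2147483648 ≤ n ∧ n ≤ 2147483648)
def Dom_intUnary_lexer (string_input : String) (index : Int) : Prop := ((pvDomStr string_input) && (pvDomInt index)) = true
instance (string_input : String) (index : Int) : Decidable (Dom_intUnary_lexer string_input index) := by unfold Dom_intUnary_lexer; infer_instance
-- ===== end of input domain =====

-- B replaces A's table-driven FSM by a two-phase scan (optional sign/digit, then a digit run); same cost (objective: simpler).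

-- ===== PORT A =====
-- A's transition table, literally.
def pvStateTable : List (List Int) := [[1, 1, 1, 2], [2, 2, 1, 2], [2, 2, 2, 2]]

-- A's while loop: returns the final i. Fuel (n - i).toNat is exactly the number of
-- remaining iterations; the pyGet? none case is where Python raises IndexError (outside Pre_).
def pvLoopA (cs : List Char) (n : Int) (state : Int) (i : Int) (fuel : Nat) : Int :=
  match fuel with
  | 0 => i
  | fuel + 1 =>
    if i = n then i
    else
      match PySem.List.pyGet? cs i with
      | none => i
      | some c =>
        let infut : Int :=
          if c = '-' then 0 else if c = '+' then 1 else if PySem.Chars.isdigit c then 2 else 3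
        let state' := PySem.List.pyGetD (PySem.List.pyGetD pvStateTable state []) infut 0
        if state' = 2 then i else pvLoopA cs n state' (i + 1) fuel

def intUnary_lexer (string_input : String) (index : Int) : Int :=
  let cs := string_input.toList
  pvLoopA cs (cs.length : Int) 0 index ((cs.length - index).toNat) - index

-- ===== PORT B =====
-- B's inner while loop: advance while the character is a digit.
def pvDigitRun (cs : List Char) (n : Int) (i : Int) (fuel : Nat) : Int :=
  match fuel with
  | 0 => i
  | fuel + 1 =>
    if i = n then i
    else
      match PySem.List.pyGet? cs i with
      | none => i
      | some c => if PySem.Chars.isdigit c then pvDigitRun cs n (i + 1) fuel else i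

def intUnary_lexer_alt (string_input : String) (index : Int) : Int :=
  let cs := string_input.toList
  let n : Int := cs.length
  if index = n then 0
  else
    match PySem.List.pyGet? cs index with
    | none => 0  -- Python raises IndexError here (outside Pre_)
    | some c =>
      if c = '+' ∨ c = '-' ∨ PySem.Chars.isdigit c then
        pvDigitRun cs n (index + 1) ((cs.length - (index + 1)).toNat) - index
      else 0

-- ===== PRECONDITION & SPEC =====
-- Pre_ excludes exactly the inputs where A raises IndexError: index beyond ±len(string_input).
def Pre_intUnary_lexer (string_input : String) (index : Int) : Prop :=
  -(string_input.toList.length : Int) ≤ index ∧ index ≤ (string_input.toList.length : Int)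
instance (string_input : String) (index : Int) : Decidable (Pre_intUnary_lexer string_input index) := by
  unfold Pre_intUnary_lexer; infer_instance
def pvWitness_intUnary_lexer : String × Int := ("+12x", 0)

def Spec_intUnary_lexer (string_input : String) (index : Int) (out : Int) : Prop := out = intUnary_lexer_alt string_input index
instance (string_input : String) (index : Int) (out : Int) : Decidable (Spec_intUnary_lexer string_input index out) := by unfold Spec_intUnary_lexer; infer_instance

-- ===== CLAIM (what is proved, stated in full; the proofs are below) =====
def Claim_equal_intUnary_lexer : Prop := ∀ (string_input : String) (index : Int), Dom_intUnary_lexer string_input index → Pre_intUnary_lexer string_input index → Spec_intUnary_lexer string_input index (intUnary_lexer string_input index)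

-- ===== LEMMAS AND PROOFS =====

-- In state 1 A's loop is exactly B's digit run: sign or junk hits state 2 (stop), a digit stays in state 1.
lemma pvLoopA_state1 (cs : List Char) (n : Int) : ∀ (fuel : Nat) (i : Int),
    pvLoopA cs n 1 i fuel = pvDigitRun cs n i fuel := by
  intro fuel
  induction fuel with
  | zero => intro i; rfl
  | succ f ih =>
    intro i
    simp only [pvLoopA, pvDigitRun]
    by_cases hn : i = n
    · simp [hn]
    · simp only [hn]
      cases h : PySem.List.pyGet? cs i with
      | none => simp
      | some c =>
        by_cases h1 : c = '-'
        · simp [h1, pvStateTable, PySem.List.pyGetD, PySem.Chars.isdigit]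
        · by_cases h2 : c = '+'
          · simp [h2, pvStateTable, PySem.List.pyGetD, PySem.Chars.isdigit]
          · by_cases h3 : PySem.Chars.isdigit c
            · simp [h1, h2, h3, pvStateTable, PySem.List.pyGetD, ih]
            · simp [h1, h2, h3, pvStateTable, PySem.List.pyGetD]

-- ===== VERDICT (by name: the statement is the Claim_ definition above) =====
theorem intUnary_lexer_spec : Claim_equal_intUnary_lexer := by
  intro s index _ _
  unfold Spec_intUnary_lexer intUnary_lexer intUnary_lexer_alt
  set cs := s.toList with hcs
  by_cases hn : index = (cs.length : Int)
  · have hf : ((cs.length : Int) - index).toNat = 0 := by omega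
    simp [hn, pvLoopA]
  · simp only [if_neg hn]
    cases h : PySem.List.pyGet? cs index with
    | none =>
      -- A's loop stops at once (fuel 0 or immediate none); result index - index = 0
      rcases Nat.eq_zero_or_pos (((cs.length : Int) - index).toNat) with hf | hf
      · simp [hf, pvLoopA]
      · obtain ⟨f, hf'⟩ : ∃ f, ((cs.length : Int) - index).toNat = f + 1 := ⟨_, (Nat.succ_pred_eq_of_pos hf).symm⟩
        simp [hf', pvLoopA, hn, h]
    | some c =>
      have hlt : index < (cs.length : Int) := by
        have := PySem.List.pyGet?_neg (xs := cs) (i := index)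
        by_contra hge
        have : PySem.List.pyGet? cs index = none := by
          rw [PySem.List.pyGet?_eq_none_iff]
          intro hr
          exact absurd hr.2 (by omega)
        simp [this] at h
      have hf' : ((cs.length : Int) - index).toNat = ((cs.length : Int) - (index + 1)).toNat + 1 := by omega
      rw [hf']
      simp only [pvLoopA, if_neg hn, h]
      by_cases h1 : c = '-'
      · simp [h1, pvStateTable, PySem.List.pyGetD, pvLoopA_state1]
      · by_cases h2 : c = '+'
        · simp [h2, pvStateTable, PySem.List.pyGetD, pvLoopA_state1]
        · by_cases h3 : PySem.Chars.isdigit c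
          · simp [h1, h2, h3, pvStateTable, PySem.List.pyGetD, pvLoopA_state1]
          · simp [h1, h2, h3, pvStateTable, PySem.List.pyGetD]
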